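-- pv_equiv track=rewrite | github.com/davenmathews/Restplus | restplus/api/v1/helpers.py | check_subsequent_punctuations
-- ===== SOURCE A (Python) =====
-- import string
--
-- def check_subsequent_punctuations(list_of_words: list):
--     for word in list_of_words[:]:
--         if word.count('.') > 3:
--             return False
--
--         char_list = list(word)
--         for i in range(len(char_list) - 1):
--             if char_list[i] in string.punctuation and char_list[i] != '.':
--                 if char_list[i] in ['!', '?', '.'] and char_list[i + 1] in ['\'', '\"']:
--                     continue
--                 if char_list[i + 1] in string.punctuation and char_list[i] != '.':
--                     return False
--     else:
--         return True
-- ===== SOURCE B (Python) =====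
-- import re
-- import string
--
-- # Bad adjacent pair as one precompiled regex:
-- #   [punct except . ! ?][any punct]  |  [!?][any punct except ' "]
-- _BAD = re.compile(
--     '[' + re.escape(''.join(c for c in string.punctuation if c not in '.!?')) + ']'
--     '[' + re.escape(string.punctuation) + ']'
--     '|[!?]'
--     '[' + re.escape(''.join(c for c in string.punctuation if c not in '\'"')) + ']'
-- )
--
--
-- def check_subsequent_punctuations(list_of_words: list):
--     for word in list_of_words:
--         if word.count('.') > 3 or _BAD.search(word):
--             return False
--     return True
-- ===== Notes on version B (the rewrite author's own statement) =====
-- stated objective: idiomatic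
-- what changed: Replaces A's per-character index loop with branch logic by a single precompiled regex (built from string.punctuation via re.escape) matching any forbidden adjacent punctuation pair, searched once per word alongside the dot-count guard.
import Mathlib
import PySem

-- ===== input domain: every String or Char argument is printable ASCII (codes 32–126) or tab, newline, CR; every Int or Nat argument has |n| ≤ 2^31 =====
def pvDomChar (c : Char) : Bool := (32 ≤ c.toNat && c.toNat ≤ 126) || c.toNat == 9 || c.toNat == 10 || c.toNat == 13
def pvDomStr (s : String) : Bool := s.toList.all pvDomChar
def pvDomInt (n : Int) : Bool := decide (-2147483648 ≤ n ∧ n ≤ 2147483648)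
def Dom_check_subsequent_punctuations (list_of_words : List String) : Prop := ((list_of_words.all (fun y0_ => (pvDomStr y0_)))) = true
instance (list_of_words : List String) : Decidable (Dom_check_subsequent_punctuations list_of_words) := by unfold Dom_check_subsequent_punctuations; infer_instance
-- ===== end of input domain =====

-- B replaces A's per-character index loop by a precompiled regex searched once per word (idiomatic).

-- B replaces A's per-character index loop by one precompiled regex for the forbidden adjacent
-- punctuation pair, searched once per word (idiomatic).

-- ===== PORT A =====
-- string.punctuation
def pyPunct : List Char := "!\"#$%&'()*+,-./:;<=>?@[\\]^_`{|}~".toList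

-- inner `for i in range(len(char_list) - 1)` loop of A; true = fell through without returning False
def innerA (cl : List Char) (i : Nat) : Bool :=
  if h : i + 1 < cl.length then
    if cl[i] ∈ pyPunct ∧ cl[i] ≠ '.' then
      if cl[i] ∈ ['!', '?', '.'] ∧ cl[i+1] ∈ ['\'', '\"'] then
        innerA cl (i+1)                      -- continue
      else if cl[i+1] ∈ pyPunct ∧ cl[i] ≠ '.' then
        false                                 -- return False
      else innerA cl (i+1)
    else innerA cl (i+1)
  else true
termination_by cl.length - i

def check_subsequent_punctuations (list_of_words : List String) : Bool :=
  -- `for word in list_of_words[:]` with early returns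
  match list_of_words with
  | [] => true
  | word :: rest =>
    if PySem.Str.count word "." > 3 then false
    else if innerA word.toList 0 then check_subsequent_punctuations rest
    else false

-- ===== PORT B =====
-- the three character classes of Source B's regex, built exactly as Source B builds them
def bFirstPlain : List Char := pyPunct.filter (fun c => c ∉ ".!?".toList)
def bSecondNoQuote : List Char := pyPunct.filter (fun c => c ∉ "'\"".toList)

-- a match attempt of the two-character alternation at one position
def bMatchHere (a b : Char) : Bool :=
  (bFirstPlain.contains a && pyPunct.contains b)
    || (("!?".toList).contains a && bSecondNoQuote.contains b)

-- hand port of _BAD.search: try a match at each successive start position (exact for this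
-- fixed two-character alternation pattern)
def bSearch : List Char → Bool
  | a :: b :: rest => bMatchHere a b || bSearch (b :: rest)
  | _ => false

def check_subsequent_punctuations_alt (list_of_words : List String) : Bool :=
  match list_of_words with
  | [] => true
  | word :: rest =>
    if PySem.Str.count word "." > 3 || bSearch word.toList then false
    else check_subsequent_punctuations_alt rest

-- ===== PRECONDITION & SPEC =====
def Spec_check_subsequent_punctuations (list_of_words : List String) (out : Bool) : Prop := out = check_subsequent_punctuations_alt list_of_words
instance (list_of_words : List String) (out : Bool) : Decidable (Spec_check_subsequent_punctuations list_of_words out) := by unfold Spec_check_subsequent_punctuations; infer_instance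

-- ===== CLAIM (what is proved, stated in full; the proofs are below) =====
def Claim_equal_check_subsequent_punctuations : Prop := ∀ (list_of_words : List String), Dom_check_subsequent_punctuations list_of_words → Spec_check_subsequent_punctuations list_of_words (check_subsequent_punctuations list_of_words)

-- ===== LEMMAS AND PROOFS =====

-- membership in Source B's derived character classes, characterised once
theorem memFirstPlain (a : Char) : (a ∈ bFirstPlain) ↔ (a ∈ pyPunct ∧ ¬a = '.' ∧ ¬a = '!' ∧ ¬a = '?') := by
  simp only [bFirstPlain, List.mem_filter, decide_eq_true_eq]
  simp only [show (".!?".toList) = ['.', '!', '?'] from rfl, List.mem_cons, List.not_mem_nil,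
    or_false, not_or]

theorem memSecondNoQuote (b : Char) : (b ∈ bSecondNoQuote) ↔ (b ∈ pyPunct ∧ ¬b = '\'' ∧ ¬b = '\"') := by
  simp only [bSecondNoQuote, List.mem_filter, decide_eq_true_eq]
  simp only [show ("'\"".toList) = ['\'', '\"'] from rfl, List.mem_cons, List.not_mem_nil,
    or_false, not_or]

-- the regex alternation, as a proposition over character classes
theorem bMatchHere_iff (a b : Char) :
    bMatchHere a b = true ↔
      ((a ∈ pyPunct ∧ ¬a = '.' ∧ ¬a = '!' ∧ ¬a = '?') ∧ b ∈ pyPunct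
        ∨ (a = '!' ∨ a = '?') ∧ (b ∈ pyPunct ∧ ¬b = '\'' ∧ ¬b = '\"')) := by
  simp only [bMatchHere, Bool.or_eq_true, Bool.and_eq_true, List.contains_eq_mem,
    decide_eq_true_eq, memFirstPlain, memSecondNoQuote,
    show ("!?".toList) = ['!', '?'] from rfl, List.mem_cons, List.not_mem_nil, or_false]

-- per-pair: B's regex alternation at a position is the negation of A's inner-loop branch logic
theorem bMatchHere_char (a b : Char) :
    (!(bMatchHere a b)) = (if a ∈ pyPunct ∧ a ≠ '.' then
                     if a ∈ ['!', '?', '.'] ∧ b ∈ ['\'', '\"'] then true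
                     else if b ∈ pyPunct ∧ a ≠ '.' then false else true
                   else true) := by
  have hm := bMatchHere_iff a b
  have i1 : a = '!' → a ∈ pyPunct ∧ ¬ a = '.' := fun h => h ▸ (by decide)
  have i2 : a = '?' → a ∈ pyPunct ∧ ¬ a = '.' := fun h => h ▸ (by decide)
  split_ifs with h1 h2 h3
  · -- quote exception: no match
    have hf : bMatchHere a b = false := by
      cases hmm : bMatchHere a b
      · rfl
      · refine absurd (hm.mp hmm) ?_
        simp only [List.mem_cons, List.not_mem_nil, or_false] at h2
        rintro (⟨⟨_, _, na1, na2⟩, _⟩ | ⟨_, _, nb1, nb2⟩)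
        · rcases h2.1 with h | h | h
          · exact na1 h
          · exact na2 h
          · exact h1.2 h
        · rcases h2.2 with h | h
          · exact nb1 h
          · exact nb2 h
    rw [hf]; rfl
  · -- adjacent punctuation, no exception: match
    have ht : bMatchHere a b = true := by
      refine hm.mpr ?_
      simp only [List.mem_cons, List.not_mem_nil, or_false, not_and, not_or] at h2
      by_cases ha : a = '!' ∨ a = '?'
      · exact Or.inr ⟨ha, h3.1,
          h2 (ha.elim (fun h => Or.inl h) (fun h => Or.inr (Or.inl h)))⟩
      · rcases not_or.mp ha with ⟨ha1, ha2⟩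
        exact Or.inl ⟨⟨h1.1, h1.2, ha1, ha2⟩, h3.1⟩
    rw [ht]; rfl
  · -- second char not punctuation: no match
    have h3' : ¬ b ∈ pyPunct := fun hb => h3 ⟨hb, h1.2⟩
    have hf : bMatchHere a b = false := by
      cases hmm : bMatchHere a b
      · rfl
      · refine absurd (hm.mp hmm) ?_
        rintro (⟨_, hb⟩ | ⟨_, hb, _⟩) <;> exact h3' hb
    rw [hf]; rfl
  · -- first char not (punctuation other than '.'): no match
    have hf : bMatchHere a b = false := by
      cases hmm : bMatchHere a b
      · rfl
      · refine absurd (hm.mp hmm) ?_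
        rintro (⟨⟨pa, nd, _, _⟩, _⟩ | ⟨ha, _⟩)
        · exact h1 ⟨pa, nd⟩
        · exact h1 (ha.elim i1 i2)
    rw [hf]; rfl

theorem bSearch_step (cl : List Char) (i : Nat) (h : i + 1 < cl.length) :
    bSearch (cl.drop i) = (bMatchHere cl[i] cl[i+1] || bSearch (cl.drop (i+1))) := by
  have h1 : cl.drop (i+1) = cl[i+1] :: cl.drop (i+2) := List.drop_eq_getElem_cons h
  have h0 : cl.drop i = cl[i] :: cl[i+1] :: cl.drop (i+2) := by
    rw [List.drop_eq_getElem_cons (by omega : i < cl.length), h1]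
  rw [h0, h1]
  rfl

-- A's index loop over cl from i equals the negated regex search on the suffix cl.drop i
theorem innerA_eq_search (cl : List Char) (i : Nat) :
    innerA cl i = !(bSearch (cl.drop i)) := by
  induction i using innerA.induct (cl := cl) with
  | case1 i h hc he ih =>
    have hp : bMatchHere cl[i] cl[i+1] = false := by
      have := bMatchHere_char cl[i] cl[i+1]
      rw [if_pos hc, if_pos he] at this
      simpa using this
    rw [innerA, dif_pos h, if_pos hc, if_pos he, ih, bSearch_step cl i h, hp, Bool.false_or]
  | case2 i h hc he hf =>
    have hp : bMatchHere cl[i] cl[i+1] = true := by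
      have := bMatchHere_char cl[i] cl[i+1]
      rw [if_pos hc, if_neg he, if_pos hf] at this
      simpa using this
    rw [innerA, dif_pos h, if_pos hc, if_neg he, if_pos hf, bSearch_step cl i h, hp]
    simp
  | case3 i h hc he hf ih =>
    have hp : bMatchHere cl[i] cl[i+1] = false := by
      have := bMatchHere_char cl[i] cl[i+1]
      rw [if_pos hc, if_neg he, if_neg hf] at this
      simpa using this
    rw [innerA, dif_pos h, if_pos hc, if_neg he, if_neg hf, ih, bSearch_step cl i h, hp,
      Bool.false_or]
  | case4 i h hc ih =>
    have hp : bMatchHere cl[i] cl[i+1] = false := by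
      have := bMatchHere_char cl[i] cl[i+1]
      rw [if_neg hc] at this
      simpa using this
    rw [innerA, dif_pos h, if_neg hc, ih, bSearch_step cl i h, hp, Bool.false_or]
  | case5 i h =>
    rw [innerA]
    simp only [h, dif_neg, not_false_iff]
    match hd : cl.drop i with
    | [] => simp [bSearch]
    | [x] => simp [bSearch]
    | x :: y :: t =>
      exfalso
      have h2 : 2 ≤ (cl.drop i).length := by rw [hd]; simp
      rw [List.length_drop] at h2
      omega

-- the two ports agree on every input
theorem ports_eq (l : List String) :
    check_subsequent_punctuations l = check_subsequent_punctuations_alt l := by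
  induction l with
  | nil => rfl
  | cons w rest ih =>
    rw [check_subsequent_punctuations, check_subsequent_punctuations_alt, ← ih,
      innerA_eq_search, List.drop_zero]
    by_cases hc : PySem.Str.count w "." > 3
    · rw [if_pos hc, if_pos (by rw [decide_eq_true hc]; rfl)]
    · cases hs : bSearch w.toList
      · rw [if_neg hc, if_pos (by rfl),
          if_neg (by rw [decide_eq_false hc]; simp)]
      · rw [if_neg hc, if_neg (by simp),
          if_pos (by simp)]

-- ===== VERDICT (by name: the statement is the Claim_ definition above) =====
theorem check_subsequent_punctuations_spec : Claim_equal_check_subsequent_punctuations := by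
  intro l _
  exact ports_eq l
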